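-- pv_equiv track=rewrite | github.com/ThePrankMonkey/codejame_collection | codejam_2018/qualification/save.py | hack
-- ===== SOURCE A (Python) =====
-- def hack(p):
--     l = list(p)
--     found_charge = False
--     for i in range(len(l)):
--         if found_charge:
--             if l[i] == "S":
--                 l[i-1], l[i] = l[i], l[i-1]
--                 break
--         if l[i] == "C":
--             found_charge = True
--     return "".join(l)
-- ===== SOURCE B (Python) =====
-- def hack(p):
--     it = iter(p)
--     out = []
--     for ch in it:
--         if ch == "C":
--             break
--         out.append(ch)
--     else:
--         return p
--     prev = "C"
--     for ch in it:
--         if ch == "S":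
--             return "".join(out) + "S" + prev + "".join(it)
--         out.append(prev)
--         prev = ch
--     return p
-- ===== Notes on version B (the rewrite author's own statement) =====
-- stated objective: alternative
-- what changed: Replaces A's single index-driven loop over a mutable char list (found_charge flag, in-place swap, unconditional final join) with two staged consumer loops over one shared iterator: the first collects the prefix up to the 'C', the second carries the predecessor character and returns early by string concatenation; no indexing and no mutation of a copy of the input.
import Mathlib
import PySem

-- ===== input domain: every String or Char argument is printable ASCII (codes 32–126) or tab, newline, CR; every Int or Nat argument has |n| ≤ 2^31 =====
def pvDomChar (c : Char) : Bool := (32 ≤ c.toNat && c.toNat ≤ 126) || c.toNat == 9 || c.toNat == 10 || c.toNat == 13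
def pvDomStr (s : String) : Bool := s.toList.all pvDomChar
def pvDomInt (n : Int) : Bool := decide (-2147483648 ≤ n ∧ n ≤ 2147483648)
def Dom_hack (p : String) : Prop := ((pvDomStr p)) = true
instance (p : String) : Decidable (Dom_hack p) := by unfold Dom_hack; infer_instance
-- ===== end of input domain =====

-- B replaces A's single index-driven loop (found_charge flag, in-place list swap, final join)
-- by two staged consumer loops over one iterator — collect the prefix up to 'C', then scan for
-- 'S' carrying the predecessor, returning early by concatenation (objective: alternative; A is total).

-- ===== PORT A =====
-- the for-loop over range(len(l)) with the found_charge flag and break, as index recursion;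
-- Python's l[i-1] is only evaluated with found_charge set, hence i ≥ 1, so Nat's i-1 is exact
def hackLoop (l : List Char) (found : Bool) (i : Nat) : List Char :=
  if h : i < l.length then
    if found && (l[i] == 'S') then
      (l.set (i-1) l[i]).set i (l[i-1]'(by omega))   -- l[i-1], l[i] = l[i], l[i-1]; then break
    else hackLoop l (found || (l[i] == 'C')) (i+1)
  else l
termination_by l.length - i

def hack (p : String) : String := String.ofList (hackLoop p.toList false 0)

-- ===== PORT B =====
-- first loop over the iterator: collect out until a 'C' is consumed (none = loop's else: no 'C')
def phase1 (acc : List Char) : List Char → Option (List Char × List Char)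
  | [] => none
  | ch :: rest => if ch = 'C' then some (acc, rest) else phase1 (acc ++ [ch]) rest

-- second loop: carry prev, on 'S' return out + 'S' + prev + remaining iterator (none = no 'S')
def phase2 (out : List Char) (prev : Char) : List Char → Option (List Char)
  | [] => none
  | ch :: rest => if ch = 'S' then some (out ++ 'S' :: prev :: rest)
                  else phase2 (out ++ [prev]) ch rest

def hack_alt (p : String) : String :=
  match phase1 [] p.toList with
  | none => p
  | some (out, rest) =>
    match phase2 out 'C' rest with
    | none => p
    | some l => String.ofList l

-- ===== PRECONDITION & SPEC =====
def Spec_hack (p : String) (out : String) : Prop := out = hack_alt p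
instance (p : String) (out : String) : Decidable (Spec_hack p out) := by unfold Spec_hack; infer_instance

-- ===== CLAIM (what is proved, stated in full; the proofs are below) =====
def Claim_equal_hack : Prop := ∀ (p : String), Dom_hack p → Spec_hack p (hack p)

-- ===== LEMMAS AND PROOFS =====

-- common functional description: go1 scans for the first 'C'; go2 then carries the previous
-- character while scanning for the first 'S', which it swaps with that predecessor
def go2 (prev : Char) : List Char → List Char
  | [] => [prev]
  | y :: ys => if y = 'S' then y :: prev :: ys else prev :: go2 y ys

def go1 : List Char → List Char
  | [] => []
  | x :: xs => if x = 'C' then go2 x xs else x :: go1 xs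

-- A's loop in the found=true state, with the scanned prefix and the carried predecessor explicit
lemma hackLoop_true (suf : List Char) : ∀ (pre : List Char) (prev : Char),
    hackLoop (pre ++ prev :: suf) true (pre.length + 1) = pre ++ go2 prev suf := by
  induction suf with
  | nil =>
    intro pre prev
    rw [hackLoop]
    have h : ¬ (pre.length + 1 < (pre ++ [prev]).length) := by simp
    simp [go2]
  | cons y ys ih =>
    intro pre prev
    rw [hackLoop]
    have hlen : pre.length + 1 < (pre ++ prev :: y :: ys).length := by simp
    rw [dif_pos hlen]
    have hy : (pre ++ prev :: y :: ys)[pre.length + 1]'hlen = y := by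
      rw [List.getElem_append_right (by omega)]; simp
    have hp : (pre ++ prev :: y :: ys)[pre.length + 1 - 1]'(by omega) = prev := by
      simp
    by_cases hS : y = 'S'
    · rw [if_pos (by simp [hS])]
      rw [hy, hp]
      simp [go2, hS]
    · rw [if_neg (by simp [hy, hS])]
      simp only [Bool.true_or]
      have := ih (pre ++ [prev]) y
      simp only [List.append_assoc, List.singleton_append, List.length_append,
        List.length_cons, List.length_nil] at this
      rw [this]
      simp [go2, hS]

-- A's loop in the found=false state
lemma hackLoop_false (suf : List Char) : ∀ (pre : List Char),
    hackLoop (pre ++ suf) false pre.length = pre ++ go1 suf := by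
  induction suf with
  | nil =>
    intro pre
    rw [hackLoop]
    simp [go1]
  | cons x xs ih =>
    intro pre
    rw [hackLoop]
    have hlen : pre.length < (pre ++ x :: xs).length := by simp
    rw [dif_pos hlen]
    have hx : (pre ++ x :: xs)[pre.length]'hlen = x := by
      rw [List.getElem_append_right (by omega)]; simp
    rw [if_neg (by simp)]
    rw [hx]
    by_cases hC : x = 'C'
    · have : (x == 'C') = true := by simp [hC]
      rw [this, Bool.false_or]
      rw [hackLoop_true xs pre x]
      simp [go1, hC]
    · have : (x == 'C') = false := by simp [hC]
      rw [this, Bool.false_or]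
      have := ih (pre ++ [x])
      simp only [List.append_assoc, List.singleton_append, List.length_append,
        List.length_cons, List.length_nil] at this
      rw [show pre.length + 1 = pre.length + 0 + 1 by omega] at this
      rw [this]
      simp [go1, hC]

lemma hack_eq_go1 (p : String) : hack p = String.ofList (go1 p.toList) := by
  have h := hackLoop_false p.toList []
  simp only [List.nil_append, List.length_nil] at h
  rw [hack, h]

lemma go1_no_C {l : List Char} (h : 'C' ∉ l) : go1 l = l := by
  induction l with
  | nil => rfl
  | cons x xs ih =>
    simp only [List.mem_cons, not_or] at h
    have hx : ¬ x = 'C' := fun e => h.1 e.symm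
    simp [go1, hx, ih h.2]

lemma go2_no_S {l : List Char} (prev : Char) (h : 'S' ∉ l) : go2 prev l = prev :: l := by
  induction l generalizing prev with
  | nil => rfl
  | cons y ys ih =>
    simp only [List.mem_cons, not_or] at h
    have hy : ¬ y = 'S' := fun e => h.1 e.symm
    simp [go2, hy, ih _ h.2]

lemma go1_split {pre : List Char} (h : 'C' ∉ pre) (rest : List Char) :
    go1 (pre ++ 'C' :: rest) = pre ++ go2 'C' rest := by
  induction pre with
  | nil => simp [go1]
  | cons x xs ih =>
    simp only [List.mem_cons, not_or] at h
    have hx : ¬ x = 'C' := fun e => h.1 e.symm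
    simp [go1, hx, ih h.2]

-- B's first loop finds no 'C' exactly when there is none
lemma phase1_none (l : List Char) : ∀ acc, phase1 acc l = none → 'C' ∉ l := by
  induction l with
  | nil => intro _ _; simp
  | cons x xs ih =>
    intro acc h
    rw [phase1] at h
    by_cases hx : x = 'C'
    · simp [hx] at h
    · rw [if_neg hx] at h
      simp only [List.mem_cons, not_or]
      exact ⟨fun e => hx e.symm, ih _ h⟩

-- B's first loop splits the input at the first 'C'
lemma phase1_some (l : List Char) : ∀ acc out rest, phase1 acc l = some (out, rest) →
    ∃ pre, out = acc ++ pre ∧ 'C' ∉ pre ∧ l = pre ++ 'C' :: rest := by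
  induction l with
  | nil => intro _ _ _ h; simp [phase1] at h
  | cons x xs ih =>
    intro acc out rest h
    rw [phase1] at h
    by_cases hx : x = 'C'
    · rw [if_pos hx] at h
      obtain ⟨h1, h2⟩ := Prod.mk.injEq .. ▸ Option.some.injEq _ _ ▸ h
      exact ⟨[], by simp [← h1], by simp, by simp [hx, ← h2]⟩
    · rw [if_neg hx] at h
      obtain ⟨pre, hout, hpre, hl⟩ := ih _ _ _ h
      exact ⟨x :: pre, by simp [hout], by
        simp only [List.mem_cons, not_or]
        exact ⟨fun e => hx e.symm, hpre⟩, by simp [hl]⟩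

-- B's second loop finds no 'S' exactly when there is none
lemma phase2_none (l : List Char) : ∀ out prev, phase2 out prev l = none → 'S' ∉ l := by
  induction l with
  | nil => intro _ _ _; simp
  | cons y ys ih =>
    intro out prev h
    rw [phase2] at h
    by_cases hy : y = 'S'
    · simp [hy] at h
    · rw [if_neg hy] at h
      simp only [List.mem_cons, not_or]
      exact ⟨fun e => hy e.symm, ih _ _ h⟩

-- B's second loop, when it returns, computes exactly the go2 swap
lemma phase2_some (l : List Char) : ∀ out prev r, phase2 out prev l = some r →
    r = out ++ go2 prev l := by
  induction l with
  | nil => intro _ _ _ h; simp [phase2] at h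
  | cons y ys ih =>
    intro out prev r h
    rw [phase2] at h
    by_cases hy : y = 'S'
    · rw [if_pos hy] at h
      rw [← Option.some.injEq _ _ |>.mp h]
      simp [go2, hy]
    · rw [if_neg hy] at h
      rw [ih _ _ _ h]
      simp [go2, hy]

-- ===== VERDICT (by name: the statement is the Claim_ definition above) =====
theorem hack_spec : Claim_equal_hack := by
  intro p _
  unfold Spec_hack
  rw [hack_eq_go1]
  unfold hack_alt
  rcases h1 : phase1 [] p.toList with _ | ⟨out, rest⟩
  · rw [go1_no_C (phase1_none _ _ h1), String.ofList_toList]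
  · obtain ⟨pre, hout, hpreC, hl⟩ := phase1_some _ _ _ _ h1
    simp only [List.nil_append] at hout
    subst hout
    rcases h2 : phase2 out 'C' rest with _ | r
    · have hS := phase2_none _ _ _ h2
      simp only
      conv_lhs => rw [hl, go1_split hpreC, go2_no_S _ hS, ← hl]
      rw [String.ofList_toList, h2]
    · simp only
      rw [hl, go1_split hpreC, h2, phase2_some _ _ _ _ h2]
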